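/- GENERATED by tools/from_farm_form.py from farm/worked/arena_poison/Proof.lean (a worked proof of the farm's unit `arena_poison`,
   accepted by the verdict) — do not edit. -/
import Asan.CheckWalk
import ProgX.Base.Spec.Units.arena_poison

open X86 X86.User Asan ProgX.Base

set_option maxRecDepth 4000
set_option maxHeartbeats 4000000

namespace ProgX.Base.Spec.Proved.arena_poison
open ProgX.Base.Spec.arena_poison (Statement)

/-- `jg` after `test rsi, rsi` (0x100cd5 / 0x100cd8, asan_rt.c:145 `size > 0`, signed): the remaining size `size - 8 i` is positive
exactly when `8 i < size`, as long as the loop has not run past the last granule (`8 i ≤ size + 7`). -/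
theorem size_pos_iff_w (r : UInt64) (i : Nat) (hn : r.toNat ≤ 0xC00000) (h2 : 8 * i ≤ r.toNat + 7) :
    (¬ (r - UInt64.ofNat (8 * i)).toNat = 0 ∧ (r - UInt64.ofNat (8 * i)).toBitVec.msb = false) ↔ 8 * i < r.toNat := by
  rw [BitVec.msb_eq_decide, UInt64.toNat_toBitVec]
  simp only [decide_eq_false_iff_not]
  by_cases h : 8 * i ≤ r.toNat
  · have e : (r - UInt64.ofNat (8 * i)).toNat = r.toNat - 8 * i := by
      u_omega
    rw [e]
    omega
  · have e : (r - UInt64.ofNat (8 * i)).toNat = 2 ^ 64 + r.toNat - 8 * i := by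
      u_omega
    rw [e]
    omega

/-- Subtracting twice is subtracting the sum (words). -/
theorem word_sub_sub_w (r x y : UInt64) : r - x - y = r - (x + y) := by
  apply UInt64.toBitVec_inj.mp
  rw [UInt64.toBitVec_sub, UInt64.toBitVec_sub, UInt64.toBitVec_sub, UInt64.toBitVec_add]
  exact BitVec.sub_sub _ _ _

/-- One more round of the loop: `fillMem` with the LAST store outermost (its definition has the first store innermost). -/
theorem fillMem_succ_w (mem : Mem) (g : Nat) (v : Byte) (k : Nat) :
    fillMem mem g v (k + 1) = (fillMem mem g v k).write (shadowAddr (g + k)) v := by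
  induction k generalizing mem g with
  | zero => rfl
  | succ k ih =>
    have e : g + (k + 1) = g + 1 + k := by omega
    rw [fillMem, ih, e]
    rfl

/-- The store of the loop body (0x100cc6, asan_rt.c:146) as `fillMem` writes it: one byte FAH at the shadow address of granule `g`. -/
theorem store_eq_w (mem : Mem) (g : Nat) :
    mem.writeLE (UInt64.ofNat g + 12582912) 1 250 = mem.write (shadowAddr g) 0xFA := by
  rw [Mem.writeLE_one]
  have e : UInt64.ofNat g + 12582912 = shadowAddr g := by
    unfold shadowAddr
    rw [Nat.add_comm, UInt64.ofNat_add]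
    rfl
  rw [e]
  rfl

end ProgX.Base.Spec.Proved.arena_poison

/-- `arena_poison(addr, size)` satisfies its contract: `shr rdi, 3`, then a loop (head 0x100cd5) of one byte store of FAH into the
shadow per granule; after `i` rounds the memory is `fillMem u.mem (addr / 8) FAH i`, at the exit `i = (size + 7) / 8`. -/
theorem ProgX.Base.Spec.Proved.arena_poison_ok : ProgX.Base.Spec.arena_poison.Statement := by
  intro Lay hLay μ hμ u₀ hcode u ret he hpre
  v_entry he
  obtain ⟨h8, hlo, hhi⟩ := hpre
  -- (a fact about the vector registers, so that the walk tracks them: `Keeps clobArena` needs `v.zmm = u.zmm`)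
  have hzmm : u.zmm = u.zmm := rfl
  -- the size is a small non-negative number
  have hn : (u.reg .rsi).toNat ≤ 0xC00000 := by omega
  -- 0x100cc0 asan_rt.c:144 `g = addr >> 3`, and the jump to the loop head
  u_walk hcode [hμ.vendor] until [ProgX.Base.L.arena_poison.loop1] span [ProgX.Base.L.textLo, ProgX.Base.L.textHi] side (v_side)
  -- 0x100cd5 asan_rt.c:145 `while (size > 0)`: the loop head. After `i` rounds: g = addr / 8 + i, size_now = size - 8 i (signed; it
  -- may have gone below 0 by at most 7), the memory is `fillMem … i` (stated right to left, so that the walker keeps the state's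
  -- memory as the base of its store nests), the return address is still on the stack
  have w_rsi : s_100cc4.reg .rsi = u.reg .rsi := w_kept.get .rsi rfl
  obtain ⟨i, hi, hrsi, hile, hfill⟩ : ∃ i : Nat,
      s_100cc4.reg .rdi = UInt64.ofNat ((u.reg .rdi).toNat / 8 + i) ∧
      s_100cc4.reg .rsi = u.reg .rsi - UInt64.ofNat (8 * i) ∧
      8 * i ≤ (u.reg .rsi).toNat + 7 ∧
      fillMem u.mem ((u.reg .rdi).toNat / 8) 0xFA i = s_100cc4.mem := by
    refine ⟨0, ?_, ?_, Nat.zero_le _, w_mem.symm⟩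
    · rw [w_rdi]
      apply UInt64.toNat_inj.mp
      u_omega
    · rw [w_rsi]
      apply UInt64.toNat_inj.mp
      u_omega
  have hs0 : UInt64.ofNat (s_100cc4.mem.readLE (u.reg .rsp) 8) = ret := by
    rw [w_mem]
    exact he_retAddr
  have hdf : s_100cc4.flags .df = false := by
    rw [w_flags]
    simp only [X86.User.df_setStatus]
    exact he_df
  replace w_kept := w_kept.mono_all (S' := [.rdi, .rsi]) (by rfl)
  clear w_mem w_flags w_rdi w_rsi
  u_loop [i] (fun v => (u.reg .rdi).toNat / 8 + ((u.reg .rsi).toNat + 7) / 8 - (v.reg .rdi).toNat)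
  u_walk hcode [hμ.vendor] until [ProgX.Base.L.arena_poison.loop1] span [ProgX.Base.L.textLo, ProgX.Base.L.textHi] side (v_side)
  · -- the back edge (0x100cd1 → 0x100cd5): `size_now > 0`, one more granule was poisoned
    have hpos : 8 * i < (u.reg .rsi).toNat :=
      (ProgX.Base.Spec.Proved.arena_poison.size_pos_iff_w (u.reg .rsi) i hn hile).mp hbr_100cd8
    -- the invariant for `i + 1`, stated before `u_loop_back`, which closes these conjuncts by `assumption` and leaves the measure
    have hi' : s_100cd1.reg .rdi = UInt64.ofNat ((u.reg .rdi).toNat / 8 + (i + 1)) := by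
      -- g = addr / 8 + (i + 1)
      rw [w_rdi, ← Nat.add_assoc]
      exact (UInt64.ofNat_add ((u.reg .rdi).toNat / 8 + i) 1).symm
    have hrsi' : s_100cd1.reg .rsi = u.reg .rsi - UInt64.ofNat (8 * (i + 1)) := by
      -- size_now = size - 8 (i + 1)
      rw [w_rsi, Nat.mul_add, UInt64.ofNat_add, ← ProgX.Base.Spec.Proved.arena_poison.word_sub_sub_w]
      rfl
    have hile' : 8 * (i + 1) ≤ (u.reg .rsi).toNat + 7 := by
      -- the loop has not run past the last granule
      omega
    have hfill' : fillMem u.mem ((u.reg .rdi).toNat / 8) 0xFA (i + 1) = s_100cd1.mem := by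
      -- the memory: one more store of `fillMem`
      rw [w_mem, ← hfill, ProgX.Base.Spec.Proved.arena_poison.store_eq_w, ProgX.Base.Spec.Proved.arena_poison.fillMem_succ_w]
    have hdf' : s_100cd1.flags .df = false := by
      -- the direction flag: `add` and `sub` wrote status flags only
      rw [w_flags]
      simp only [X86.User.df_setStatus]
      exact hdf
    u_loop_back [i + 1]
    -- the measure: the granules still to poison
    rw [w_rdi]
    u_omega
  · -- the exit (0x100cda `ret`): `size_now ≤ 0`, so `i = (size + 7) / 8` stores were made: `poisonMem`
    have hnpos : ¬ 8 * i < (u.reg .rsi).toNat :=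
      fun h => hbr_100cd8 ((ProgX.Base.Spec.Proved.arena_poison.size_pos_iff_w (u.reg .rsi) i hn hile).mpr h)
    have hi8 : i = ((u.reg .rsi).toNat + 7) / 8 := by omega
    have hmem : s_100cda.mem = poisonMem u.mem (u.reg .rdi).toNat (u.reg .rsi).toNat := by
      rw [w_mem, ← hfill]
      unfold poisonMem
      rw [← hi8]
    -- DF and the MXCSR masks of the final state, stated BEFORE `v_returned`: its `v_inv` looks for them by `assumption`, which finds
    -- these first (otherwise it compares the MXCSR goal with `hs0` and `he_retAddr` by unfolding `&&&` and `UInt64.ofNat`: 15 s)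
    have hdf' : s_100cda.flags .df = false := by
      rw [w_flags]
      simp only [X86.User.df_setStatus]
      exact hdf
    have hmx' : s_100cda.mxcsr &&& 8064 = 8064 := by
      rw [w_mxcsr]
      exact he_mx
    refine ReachVia.done (Or.inl ?_)
    v_returned
    · -- the post: the memory is `poisonMem`; every register but rdi rsi rsp, zmm and MXCSR are kept
      exact ⟨hmem, w_kept.mono_all (by rfl), w_zmm, w_mxcsr⟩
    · -- the footprint: the shadow bytes of the granules of `[addr, addr + size)`
      rw [hmem]
      intro a ha
      apply poisonMem_sameExcept u.mem _ _ h8 hhi a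
      intro w hw
      exact ha w (List.mem_cons_of_mem _ hw)
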